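-- pv_equiv track=rewrite | github.com/aeroej/Python-Algorithms | baekjoon/silver/거북이.py | tutle
-- ===== SOURCE A (Python) =====
-- def tutle(moves):
--   x = [0, 0]  # -x, +x
--   y = [0, 0]  # -y, +y
--
--   dx = -1
--   dy = 0
--   tt = [0, 0]
--
--   for move in moves:
--     if move == 'F':
--       tt[0] += dx
--       tt[1] += dy
--
--     elif move == 'B':
--       tt[0] -= dx
--       tt[1] -= dy
--
--     elif move == 'L':
--       if dx == 0:  # y가 1 또는 -1인 경우
--         dx, dy = -dy, 0
--       else:
--         dx, dy = 0, dx
--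
--     elif move == 'R':
--       if dx == 0:
--         dx, dy = dy, 0
--       else:
--         dx, dy = 0, -dx
--
--     if tt[0] < x[0]:
--         x[0] = tt[0]
--     elif tt[0] > x[1]:
--         x[1] = tt[0]
--     if tt[1] < y[0]:
--         y[0] = tt[1]
--     elif tt[1] > y[1]:
--         y[1] = tt[1]
--
--   return x, y
-- ===== SOURCE B (Python) =====
-- def tutle(moves):
--     DIRS = [(-1, 0), (0, -1), (1, 0), (0, 1)]
--     # pass 1: rotation index in effect at each move (rotations only; ignores position)
--     headings = []
--     h = 0
--     for m in moves:
--         headings.append(h)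
--         if m == 'L':
--             h = (h + 1) % 4
--         elif m == 'R':
--             h = (h - 1) % 4
--     # pass 2: turn each move into a displacement vector (turns contribute (0, 0))
--     signs = {'F': 1, 'B': -1}
--     deltas = [(signs.get(m, 0) * DIRS[r][0], signs.get(m, 0) * DIRS[r][1])
--               for m, r in zip(moves, headings)]
--     # pass 3: prefix-sum the deltas into the visited coordinate lists
--     xs, ys = [0], [0]
--     cx = cy = 0
--     for dx, dy in deltas:
--         cx += dx
--         cy += dy
--         xs.append(cx)
--         ys.append(cy)
--     return [min(xs), max(xs)], [min(ys), max(ys)]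
-- ===== Notes on version B (the rewrite author's own statement) =====
-- stated objective: alternative
-- what changed: Replaces A's single fused simulation (branch-rotated heading vector plus elif-guarded incremental bounding-box updates) by a staged stream pipeline: a rotation-only pass computing the heading index at each move, a map turning each (move, heading) pair into a displacement vector, a prefix-sum pass producing the visited coordinate lists, and a final min/max aggregation.
import Mathlib
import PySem

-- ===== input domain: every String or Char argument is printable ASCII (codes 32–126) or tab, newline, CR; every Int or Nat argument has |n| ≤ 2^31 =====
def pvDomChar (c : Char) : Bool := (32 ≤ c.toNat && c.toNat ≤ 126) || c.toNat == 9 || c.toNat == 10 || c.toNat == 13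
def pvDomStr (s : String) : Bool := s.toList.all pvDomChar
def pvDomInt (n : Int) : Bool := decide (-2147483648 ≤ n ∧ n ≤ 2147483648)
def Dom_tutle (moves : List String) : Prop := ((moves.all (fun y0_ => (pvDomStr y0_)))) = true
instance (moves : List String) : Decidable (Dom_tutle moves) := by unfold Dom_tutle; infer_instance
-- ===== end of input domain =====

-- B replaces A's fused heading-vector simulation with incremental elif min/max box updates by a
-- staged pipeline: headings pass, per-move displacement map, prefix-sum pass, min/max aggregation
-- (alternative decomposition, same cost).

-- ===== PORT A =====
-- state: (x0, x1, y0, y1, dx, dy, t0, t1)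
def tutleStep (s : Int × Int × Int × Int × Int × Int × Int × Int) (move : String) :
    Int × Int × Int × Int × Int × Int × Int × Int :=
  let (x0, x1, y0, y1, dx, dy, t0, t1) := s
  let (dx', dy', t0', t1') :=
    if move == "F" then (dx, dy, t0 + dx, t1 + dy)
    else if move == "B" then (dx, dy, t0 - dx, t1 - dy)
    else if move == "L" then
      (if dx == 0 then (-dy, 0, t0, t1) else (0, dx, t0, t1))
    else if move == "R" then
      (if dx == 0 then (dy, 0, t0, t1) else (0, -dx, t0, t1))
    else (dx, dy, t0, t1)
  let x0' := if t0' < x0 then t0' else x0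
  let x1' := if t0' < x0 then x1 else if x1 < t0' then t0' else x1
  let y0' := if t1' < y0 then t1' else y0
  let y1' := if t1' < y0 then y1 else if y1 < t1' then t1' else y1
  (x0', x1', y0', y1', dx', dy', t0', t1')

def tutle (moves : List String) : List Int × List Int :=
  let s := moves.foldl tutleStep (0, 0, 0, 0, -1, 0, 0, 0)
  ([s.1, s.2.1], [s.2.2.1, s.2.2.2.1])

-- ===== PORT B =====
def tutleDirs : List (Int × Int) := [(-1, 0), (0, -1), (1, 0), (0, 1)]

-- rotation update of pass 1's loop body
def tutleNext (h : Int) (m : String) : Int :=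
  if m == "L" then PySem.Int.mod (h + 1) 4
  else if m == "R" then PySem.Int.mod (h - 1) 4
  else h

-- pass 1: heading index in effect at each move (the loop as structural recursion on moves)
def tutleHeadings (h : Int) : List String → List Int
  | [] => []
  | m :: rest => h :: tutleHeadings (tutleNext h m) rest

-- pass 2's comprehension body; '.getD (0,0)' only makes the indexing total (r is always 0..3)
def tutleDelta (p : String × Int) : Int × Int :=
  let s : Int := if p.1 == "F" then 1 else if p.1 == "B" then -1 else 0
  let d := (PySem.List.pyGet? tutleDirs p.2).getD (0, 0)
  (s * d.1, s * d.2)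

-- pass 3: prefix sums of the deltas into the visited coordinate lists
def tutlePrefix (cx cy : Int) (xs ys : List Int) : List (Int × Int) → List Int × List Int
  | [] => (xs, ys)
  | d :: rest => tutlePrefix (cx + d.1) (cy + d.2) (xs ++ [cx + d.1]) (ys ++ [cy + d.2]) rest

-- Python's min/max over a list; the 0 default is never used (xs, ys are nonempty)
def tutleMin (l : List Int) : Int := match l with | [] => 0 | h :: t => t.foldl min h
def tutleMax (l : List Int) : Int := match l with | [] => 0 | h :: t => t.foldl max h

def tutle_alt (moves : List String) : List Int × List Int :=
  let hs := tutleHeadings 0 moves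
  let ds := (moves.zip hs).map tutleDelta
  let p := tutlePrefix 0 0 [0] [0] ds
  ([tutleMin p.1, tutleMax p.1], [tutleMin p.2, tutleMax p.2])

-- ===== PRECONDITION & SPEC =====
def Spec_tutle (moves : List String) (out : List Int × List Int) : Prop := out = tutle_alt moves
instance (moves : List String) (out : List Int × List Int) : Decidable (Spec_tutle moves out) := by unfold Spec_tutle; infer_instance

-- ===== CLAIM (what is proved, stated in full; the proofs are below) =====
def Claim_equal_tutle : Prop := ∀ (moves : List String), Dom_tutle moves → Spec_tutle moves (tutle moves)

-- ===== LEMMAS AND PROOFS =====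

-- B's whole pipeline started from an arbitrary mid-run state (proof-only helper)
def gB (h cx cy : Int) (xs ys : List Int) (moves : List String) : List Int × List Int :=
  tutlePrefix cx cy xs ys ((moves.zip (tutleHeadings h moves)).map tutleDelta)

theorem gB_cons (h cx cy : Int) (xs ys : List Int) (m : String) (rest : List String) :
    gB h cx cy xs ys (m :: rest) =
      gB (tutleNext h m) (cx + (tutleDelta (m, h)).1) (cy + (tutleDelta (m, h)).2)
        (xs ++ [cx + (tutleDelta (m, h)).1]) (ys ++ [cy + (tutleDelta (m, h)).2]) rest := by
  simp [gB, tutleHeadings, tutlePrefix]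

theorem tutleMin_append (l : List Int) (a : Int) (h : l ≠ []) :
    tutleMin (l ++ [a]) = min (tutleMin l) a := by
  cases l with
  | nil => exact absurd rfl h
  | cons x t => simp [tutleMin, List.foldl_append]

theorem tutleMax_append (l : List Int) (a : Int) (h : l ≠ []) :
    tutleMax (l ++ [a]) = max (tutleMax l) a := by
  cases l with
  | nil => exact absurd rfl h
  | cons x t => simp [tutleMax, List.foldl_append]

-- the loop invariant: A's fold state against B's pipeline started mid-run
theorem tutle_loop (moves : List String) :
    ∀ (h x0 x1 y0 y1 dx dy t0 t1 : Int) (xs ys : List Int),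
      (h = 0 ∨ h = 1 ∨ h = 2 ∨ h = 3) →
      (PySem.List.pyGet? tutleDirs h).getD (0, 0) = (dx, dy) →
      xs ≠ [] → ys ≠ [] →
      x0 = tutleMin xs → x1 = tutleMax xs → y0 = tutleMin ys → y1 = tutleMax ys →
      x0 ≤ x1 → y0 ≤ y1 →
      (let sA := moves.foldl tutleStep (x0, x1, y0, y1, dx, dy, t0, t1)
       let p := gB h t0 t1 xs ys moves
       ([sA.1, sA.2.1], [sA.2.2.1, sA.2.2.2.1]) =
         (([tutleMin p.1, tutleMax p.1], [tutleMin p.2, tutleMax p.2]) :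
           List Int × List Int)) := by
  induction moves with
  | nil =>
    intro h x0 x1 y0 y1 dx dy t0 t1 xs ys hi hdir hxne hyne hx0 hx1 hy0 hy1 hxle hyle
    simp [List.foldl, gB, tutleHeadings, tutlePrefix]
    exact ⟨⟨hx0, hx1⟩, hy0, hy1⟩
  | cons m rest ih =>
    intro h x0 x1 y0 y1 dx dy t0 t1 xs ys hi hdir hxne hyne hx0 hx1 hy0 hy1 hxle hyle
    -- A's elif-guarded box update equals a plain min/max update (uses x0 ≤ x1, y0 ≤ y1)
    have key : ∀ (t0' t1' dx' dy' : Int),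
        (rest.foldl tutleStep
          ((if t0' < x0 then t0' else x0),
           (if t0' < x0 then x1 else if x1 < t0' then t0' else x1),
           (if t1' < y0 then t1' else y0),
           (if t1' < y0 then y1 else if y1 < t1' then t1' else y1),
           dx', dy', t0', t1')) = rest.foldl tutleStep
          (min x0 t0', max x1 t0', min y0 t1', max y1 t1', dx', dy', t0', t1') := by
      intro t0' t1' dx' dy'
      have h1 : (if t0' < x0 then t0' else x0) = min x0 t0' := by
        simp [min_def]; omega
      have h2 : (if t0' < x0 then x1 else if x1 < t0' then t0' else x1) = max x1 t0' := by
        simp [max_def]; omega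
      have h3 : (if t1' < y0 then t1' else y0) = min y0 t1' := by
        simp [min_def]; omega
      have h4 : (if t1' < y0 then y1 else if y1 < t1' then t1' else y1) = max y1 t1' := by
        simp [max_def]; omega
      rw [h1, h2, h3, h4]
    -- the induction hypothesis, instantiated at the stepped state
    have stepIH : ∀ (t0' t1' dx' dy' h' : Int),
        (h' = 0 ∨ h' = 1 ∨ h' = 2 ∨ h' = 3) →
        (PySem.List.pyGet? tutleDirs h').getD (0, 0) = (dx', dy') →
        (let sA := rest.foldl tutleStep
            (min x0 t0', max x1 t0', min y0 t1', max y1 t1', dx', dy', t0', t1')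
         let p := gB h' t0' t1' (xs ++ [t0']) (ys ++ [t1']) rest
         ([sA.1, sA.2.1], [sA.2.2.1, sA.2.2.2.1]) =
           (([tutleMin p.1, tutleMax p.1], [tutleMin p.2, tutleMax p.2]) :
             List Int × List Int)) := by
      intro t0' t1' dx' dy' h' hi' hdir'
      apply ih h' (min x0 t0') (max x1 t0') (min y0 t1') (max y1 t1') dx' dy' t0' t1'
        (xs ++ [t0']) (ys ++ [t1']) hi' hdir'
      · simp
      · simp
      · simp [tutleMin_append _ _ hxne, hx0]
      · simp [tutleMax_append _ _ hxne, hx1]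
      · simp [tutleMin_append _ _ hyne, hy0]
      · simp [tutleMax_append _ _ hyne, hy1]
      · exact le_trans (min_le_left _ _) (le_trans hxle (le_max_left _ _))
      · exact le_trans (min_le_left _ _) (le_trans hyle (le_max_left _ _))
    simp only [List.foldl_cons]
    rw [gB_cons]
    by_cases hF : m = "F"
    · subst hF
      rw [show tutleStep (x0, x1, y0, y1, dx, dy, t0, t1) "F"
            = ((if t0 + dx < x0 then t0 + dx else x0),
               (if t0 + dx < x0 then x1 else if x1 < t0 + dx then t0 + dx else x1),
               (if t1 + dy < y0 then t1 + dy else y0),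
               (if t1 + dy < y0 then y1 else if y1 < t1 + dy then t1 + dy else y1),
               dx, dy, t0 + dx, t1 + dy) from by simp [tutleStep],
          key (t0 + dx) (t1 + dy) dx dy,
          show tutleDelta ("F", h) = (dx, dy) from by simp [tutleDelta, hdir],
          show tutleNext h "F" = h from by simp [tutleNext]]
      exact stepIH (t0 + dx) (t1 + dy) dx dy h hi hdir
    by_cases hB : m = "B"
    · subst hB
      rw [show tutleStep (x0, x1, y0, y1, dx, dy, t0, t1) "B"
            = ((if t0 - dx < x0 then t0 - dx else x0),
               (if t0 - dx < x0 then x1 else if x1 < t0 - dx then t0 - dx else x1),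
               (if t1 - dy < y0 then t1 - dy else y0),
               (if t1 - dy < y0 then y1 else if y1 < t1 - dy then t1 - dy else y1),
               dx, dy, t0 - dx, t1 - dy) from by simp [tutleStep],
          key (t0 - dx) (t1 - dy) dx dy,
          show tutleDelta ("B", h) = (-dx, -dy) from by simp [tutleDelta, hdir],
          show tutleNext h "B" = h from by simp [tutleNext],
          show t0 + -dx = t0 - dx from by ring,
          show t1 + -dy = t1 - dy from by ring]
      exact stepIH (t0 - dx) (t1 - dy) dx dy h hi hdir
    by_cases hL : m = "L"
    · subst hL
      rw [show tutleDelta ("L", h) = (0, 0) from by simp [tutleDelta],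
          show t0 + (0 : Int) = t0 from by ring, show t1 + (0 : Int) = t1 from by ring]
      rcases hi with hi | hi | hi | hi <;> subst hi
      · -- L, h = 0
        rw [show (PySem.List.pyGet? tutleDirs 0).getD (0, 0) = (((-1) : Int), (0 : Int)) from by decide] at hdir
        obtain ⟨hdx, hdy⟩ := Prod.mk.injEq .. ▸ hdir
        subst hdx; subst hdy
        rw [show tutleStep (x0, x1, y0, y1, ((-1) : Int), (0 : Int), t0, t1) "L"
              = ((if t0 < x0 then t0 else x0),
                 (if t0 < x0 then x1 else if x1 < t0 then t0 else x1),
                 (if t1 < y0 then t1 else y0),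
                 (if t1 < y0 then y1 else if y1 < t1 then t1 else y1),
                 (0 : Int), ((-1) : Int), t0, t1) from by simp [tutleStep],
            key t0 t1 (0 : Int) ((-1) : Int),
            show tutleNext 0 "L" = 1 from by decide]
        exact stepIH t0 t1 (0 : Int) ((-1) : Int) 1 (by omega) (by decide)
      · -- L, h = 1
        rw [show (PySem.List.pyGet? tutleDirs 1).getD (0, 0) = ((0 : Int), ((-1) : Int)) from by decide] at hdir
        obtain ⟨hdx, hdy⟩ := Prod.mk.injEq .. ▸ hdir
        subst hdx; subst hdy
        rw [show tutleStep (x0, x1, y0, y1, (0 : Int), ((-1) : Int), t0, t1) "L"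
              = ((if t0 < x0 then t0 else x0),
                 (if t0 < x0 then x1 else if x1 < t0 then t0 else x1),
                 (if t1 < y0 then t1 else y0),
                 (if t1 < y0 then y1 else if y1 < t1 then t1 else y1),
                 (1 : Int), (0 : Int), t0, t1) from by simp [tutleStep],
            key t0 t1 (1 : Int) (0 : Int),
            show tutleNext 1 "L" = 2 from by decide]
        exact stepIH t0 t1 (1 : Int) (0 : Int) 2 (by omega) (by decide)
      · -- L, h = 2
        rw [show (PySem.List.pyGet? tutleDirs 2).getD (0, 0) = ((1 : Int), (0 : Int)) from by decide] at hdir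
        obtain ⟨hdx, hdy⟩ := Prod.mk.injEq .. ▸ hdir
        subst hdx; subst hdy
        rw [show tutleStep (x0, x1, y0, y1, (1 : Int), (0 : Int), t0, t1) "L"
              = ((if t0 < x0 then t0 else x0),
                 (if t0 < x0 then x1 else if x1 < t0 then t0 else x1),
                 (if t1 < y0 then t1 else y0),
                 (if t1 < y0 then y1 else if y1 < t1 then t1 else y1),
                 (0 : Int), (1 : Int), t0, t1) from by simp [tutleStep],
            key t0 t1 (0 : Int) (1 : Int),
            show tutleNext 2 "L" = 3 from by decide]
        exact stepIH t0 t1 (0 : Int) (1 : Int) 3 (by omega) (by decide)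
      · -- L, h = 3
        rw [show (PySem.List.pyGet? tutleDirs 3).getD (0, 0) = ((0 : Int), (1 : Int)) from by decide] at hdir
        obtain ⟨hdx, hdy⟩ := Prod.mk.injEq .. ▸ hdir
        subst hdx; subst hdy
        rw [show tutleStep (x0, x1, y0, y1, (0 : Int), (1 : Int), t0, t1) "L"
              = ((if t0 < x0 then t0 else x0),
                 (if t0 < x0 then x1 else if x1 < t0 then t0 else x1),
                 (if t1 < y0 then t1 else y0),
                 (if t1 < y0 then y1 else if y1 < t1 then t1 else y1),
                 ((-1) : Int), (0 : Int), t0, t1) from by simp [tutleStep],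
            key t0 t1 ((-1) : Int) (0 : Int),
            show tutleNext 3 "L" = 0 from by decide]
        exact stepIH t0 t1 ((-1) : Int) (0 : Int) 0 (by omega) (by decide)
    by_cases hR : m = "R"
    · subst hR
      rw [show tutleDelta ("R", h) = (0, 0) from by simp [tutleDelta],
          show t0 + (0 : Int) = t0 from by ring, show t1 + (0 : Int) = t1 from by ring]
      rcases hi with hi | hi | hi | hi <;> subst hi
      · -- R, h = 0
        rw [show (PySem.List.pyGet? tutleDirs 0).getD (0, 0) = (((-1) : Int), (0 : Int)) from by decide] at hdir
        obtain ⟨hdx, hdy⟩ := Prod.mk.injEq .. ▸ hdir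
        subst hdx; subst hdy
        rw [show tutleStep (x0, x1, y0, y1, ((-1) : Int), (0 : Int), t0, t1) "R"
              = ((if t0 < x0 then t0 else x0),
                 (if t0 < x0 then x1 else if x1 < t0 then t0 else x1),
                 (if t1 < y0 then t1 else y0),
                 (if t1 < y0 then y1 else if y1 < t1 then t1 else y1),
                 (0 : Int), (1 : Int), t0, t1) from by simp [tutleStep],
            key t0 t1 (0 : Int) (1 : Int),
            show tutleNext 0 "R" = 3 from by decide]
        exact stepIH t0 t1 (0 : Int) (1 : Int) 3 (by omega) (by decide)
      · -- R, h = 1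
        rw [show (PySem.List.pyGet? tutleDirs 1).getD (0, 0) = ((0 : Int), ((-1) : Int)) from by decide] at hdir
        obtain ⟨hdx, hdy⟩ := Prod.mk.injEq .. ▸ hdir
        subst hdx; subst hdy
        rw [show tutleStep (x0, x1, y0, y1, (0 : Int), ((-1) : Int), t0, t1) "R"
              = ((if t0 < x0 then t0 else x0),
                 (if t0 < x0 then x1 else if x1 < t0 then t0 else x1),
                 (if t1 < y0 then t1 else y0),
                 (if t1 < y0 then y1 else if y1 < t1 then t1 else y1),
                 ((-1) : Int), (0 : Int), t0, t1) from by simp [tutleStep],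
            key t0 t1 ((-1) : Int) (0 : Int),
            show tutleNext 1 "R" = 0 from by decide]
        exact stepIH t0 t1 ((-1) : Int) (0 : Int) 0 (by omega) (by decide)
      · -- R, h = 2
        rw [show (PySem.List.pyGet? tutleDirs 2).getD (0, 0) = ((1 : Int), (0 : Int)) from by decide] at hdir
        obtain ⟨hdx, hdy⟩ := Prod.mk.injEq .. ▸ hdir
        subst hdx; subst hdy
        rw [show tutleStep (x0, x1, y0, y1, (1 : Int), (0 : Int), t0, t1) "R"
              = ((if t0 < x0 then t0 else x0),
                 (if t0 < x0 then x1 else if x1 < t0 then t0 else x1),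
                 (if t1 < y0 then t1 else y0),
                 (if t1 < y0 then y1 else if y1 < t1 then t1 else y1),
                 (0 : Int), ((-1) : Int), t0, t1) from by simp [tutleStep],
            key t0 t1 (0 : Int) ((-1) : Int),
            show tutleNext 2 "R" = 1 from by decide]
        exact stepIH t0 t1 (0 : Int) ((-1) : Int) 1 (by omega) (by decide)
      · -- R, h = 3
        rw [show (PySem.List.pyGet? tutleDirs 3).getD (0, 0) = ((0 : Int), (1 : Int)) from by decide] at hdir
        obtain ⟨hdx, hdy⟩ := Prod.mk.injEq .. ▸ hdir
        subst hdx; subst hdy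
        rw [show tutleStep (x0, x1, y0, y1, (0 : Int), (1 : Int), t0, t1) "R"
              = ((if t0 < x0 then t0 else x0),
                 (if t0 < x0 then x1 else if x1 < t0 then t0 else x1),
                 (if t1 < y0 then t1 else y0),
                 (if t1 < y0 then y1 else if y1 < t1 then t1 else y1),
                 (1 : Int), (0 : Int), t0, t1) from by simp [tutleStep],
            key t0 t1 (1 : Int) (0 : Int),
            show tutleNext 3 "R" = 2 from by decide]
        exact stepIH t0 t1 (1 : Int) (0 : Int) 2 (by omega) (by decide)
    · -- any other move string: position, heading and box state step trivially
      rw [show tutleStep (x0, x1, y0, y1, dx, dy, t0, t1) m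
            = ((if t0 < x0 then t0 else x0),
               (if t0 < x0 then x1 else if x1 < t0 then t0 else x1),
               (if t1 < y0 then t1 else y0),
               (if t1 < y0 then y1 else if y1 < t1 then t1 else y1),
               dx, dy, t0, t1) from by simp [tutleStep, hF, hB, hL, hR],
          key t0 t1 dx dy,
          show tutleDelta (m, h) = (0, 0) from by simp [tutleDelta, hF, hB],
          show t0 + (0 : Int) = t0 from by ring, show t1 + (0 : Int) = t1 from by ring,
          show tutleNext h m = h from by simp [tutleNext, hL, hR]]
      exact stepIH t0 t1 dx dy h hi hdir

-- ===== VERDICT (by name: the statement is the Claim_ definition above) =====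
theorem tutle_spec : Claim_equal_tutle := by
  intro moves _
  show tutle moves = tutle_alt moves
  have := tutle_loop moves 0 0 0 0 0 (-1) 0 0 0 [(0 : Int)] [(0 : Int)]
    (by omega) (by decide) (by simp) (by simp) (by decide) (by decide) (by decide) (by decide)
    (by omega) (by omega)
  simpa [tutle, tutle_alt, gB] using this
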